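-- pv_equiv track=rewrite | github.com/FilipaPereira/SPLN_1920 | TP1/ex1.py | groupAndRemove
-- ===== SOURCE A (Python) =====
-- def groupAndRemove(pairs):
--     pairOccur = {}
--     for p in pairs:
--         if p in pairOccur:
--             occ = pairOccur.get(p)
--             occ += 1
--             pairOccur.update({p : occ})
--         else:
--             if (p[1],p[0]) in pairOccur:
--                 inv = (p[1],p[0])
--                 occ = pairOccur.get(inv)
--                 occ += 1
--                 pairOccur.update({inv : occ})
--             else:
--                 pairOccur[p] = 1
--
--     for k,v in list(pairOccur.items()):
--         if v < 5:
--             pairOccur.pop(k)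
--
--     return pairOccur
-- ===== SOURCE B (Python) =====
-- def groupAndRemove(pairs):
--     result = {}
--     seen = []
--     for p in pairs:
--         inv = (p[1], p[0])
--         if p not in seen and inv not in seen:
--             c = sum(1 for q in pairs if q == p or q == inv)
--             if c >= 5:
--                 result[p] = c
--         seen.append(p)
--     return result
-- ===== Notes on version B (the rewrite author's own statement) =====
-- stated objective: alternative
-- what changed: A interleaves counting and inverse-merging in one mutable dict fold and deletes small counts in a second pass over the dict; B instead selects one representative orientation per unordered pair (first occurrence), counts each class by a full scan, and filters >= 5 inline, never mutating counts.
import Mathlib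
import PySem

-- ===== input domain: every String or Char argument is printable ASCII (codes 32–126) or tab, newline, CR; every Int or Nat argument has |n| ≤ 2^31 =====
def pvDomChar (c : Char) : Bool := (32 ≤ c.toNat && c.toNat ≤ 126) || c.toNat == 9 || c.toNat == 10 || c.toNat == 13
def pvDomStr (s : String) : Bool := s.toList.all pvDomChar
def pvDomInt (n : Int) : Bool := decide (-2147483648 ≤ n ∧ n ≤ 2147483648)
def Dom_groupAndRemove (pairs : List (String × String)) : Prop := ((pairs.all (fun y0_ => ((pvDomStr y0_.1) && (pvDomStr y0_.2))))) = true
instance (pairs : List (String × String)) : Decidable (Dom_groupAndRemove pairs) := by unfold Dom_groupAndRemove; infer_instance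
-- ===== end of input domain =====

-- B replaces A's interleaved count-and-merge dict fold (plus a deletion pass over the dict) by
-- picking one representative orientation per unordered pair and counting that pair's class over
-- the whole list, filtering >= 5 inline ("alternative": no speed claim).

-- ===== PORT A =====
-- one iteration of A's first loop over `pairs`
def pvStepA (d : PySem.Dict (String × String) Int) (p : String × String) :
    PySem.Dict (String × String) Int :=
  if d.contains p then
    let occ := d.getD p 0
    d.insert p (occ + 1)
  else if d.contains (p.2, p.1) then
    let inv := (p.2, p.1)
    let occ := d.getD inv 0
    d.insert inv (occ + 1)
  else
    d.insert p 1

def groupAndRemove (pairs : List (String × String)) : List (String × String × Int) :=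
  let pairOccur := pairs.foldl pvStepA PySem.Dict.empty
  -- for k,v in list(pairOccur.items()): if v < 5: pairOccur.pop(k)
  let final := pairOccur.items.foldl
    (fun (d : PySem.Dict (String × String) Int) kv => if kv.2 < 5 then d.erase kv.1 else d)
    pairOccur
  final.items.map (fun kv => (kv.1.1, kv.1.2, kv.2))   -- the returned dict as an association list

-- ===== PORT B =====
-- c = sum(1 for q in pairs if q == p or q == inv)
def pvCount (pairs : List (String × String)) (p inv : String × String) : Int :=
  pairs.foldl (fun a q => if q = p ∨ q = inv then a + 1 else a) 0

-- one iteration of B's loop; the state is the pair (result, seen)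
def pvStepB (pairs : List (String × String))
    (st : PySem.Dict (String × String) Int × List (String × String)) (p : String × String) :
    PySem.Dict (String × String) Int × List (String × String) :=
  let inv := (p.2, p.1)
  let result :=
    if p ∉ st.2 ∧ inv ∉ st.2 then
      let c := pvCount pairs p inv
      if c ≥ 5 then st.1.insert p c else st.1
    else st.1
  (result, st.2 ++ [p])

def groupAndRemove_alt (pairs : List (String × String)) : List (String × String × Int) :=
  let st := pairs.foldl (pvStepB pairs) (PySem.Dict.empty, [])
  st.1.items.map (fun kv => (kv.1.1, kv.1.2, kv.2))   -- the returned dict as an association list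

-- ===== PRECONDITION & SPEC =====
def Spec_groupAndRemove (pairs : List (String × String)) (out : List (String × String × Int)) : Prop := out = groupAndRemove_alt pairs
instance (pairs : List (String × String)) (out : List (String × String × Int)) : Decidable (Spec_groupAndRemove pairs out) := by unfold Spec_groupAndRemove; infer_instance

-- ===== CLAIM (what is proved, stated in full; the proofs are below) =====
def Claim_equal_groupAndRemove : Prop := ∀ (pairs : List (String × String)), Dom_groupAndRemove pairs → Spec_groupAndRemove pairs (groupAndRemove pairs)

-- ===== LEMMAS AND PROOFS =====

-- the inverse orientation of a pair
def pvSw (p : String × String) : String × String := (p.2, p.1)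

theorem pvSw_sw (p : String × String) : pvSw (pvSw p) = p := rfl

-- the representatives A keeps as dict keys / B keeps in `result`: elements whose class
-- (the element itself or its inverse) does not occur in `seen ++ (earlier prefix)`
def pvReps (seen l : List (String × String)) : List (String × String) :=
  match l with
  | [] => []
  | p :: t => if p ∈ seen ∨ pvSw p ∈ seen then pvReps (seen ++ [p]) t
              else p :: pvReps (seen ++ [p]) t

theorem pvCount_eq_countP (l : List (String × String)) (p inv : String × String) :
    pvCount l p inv = (l.countP (fun q => decide (q = p ∨ q = inv)) : Int) := by
  have h : pvCount l p inv
      = l.foldl (fun a q => if (fun q => decide (q = p ∨ q = inv)) q = true then a + 1 else a) 0 := by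
    unfold pvCount
    congr 1
    funext a q
    simp
  rw [h, PySem.List.foldl_count_if]
  simp

theorem pvReps_subset {seen l : List (String × String)} {p : String × String}
    (h : p ∈ pvReps seen l) : p ∈ l ∧ p ∉ seen ∧ pvSw p ∉ seen := by
  induction l generalizing seen with
  | nil => simp [pvReps] at h
  | cons q t ih =>
    unfold pvReps at h
    split at h
    · obtain ⟨h1, h2, h3⟩ := ih h
      simp only [List.mem_append, List.mem_singleton, not_or] at h2 h3
      exact ⟨List.mem_cons_of_mem _ h1, h2.1, h3.1⟩
    · rcases List.mem_cons.1 h with rfl | h'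
      · rename_i hc; rw [not_or] at hc; exact ⟨List.mem_cons_self, hc.1, hc.2⟩
      · obtain ⟨h1, h2, h3⟩ := ih h'
        simp only [List.mem_append, List.mem_singleton, not_or] at h2 h3
        exact ⟨List.mem_cons_of_mem _ h1, h2.1, h3.1⟩

theorem pvReps_cover {seen l : List (String × String)} {q : String × String} (h : q ∈ l) :
    q ∈ seen ∨ pvSw q ∈ seen ∨ q ∈ pvReps seen l ∨ pvSw q ∈ pvReps seen l := by
  induction l generalizing seen with
  | nil => simp at h
  | cons p t ih =>
    rcases List.mem_cons.1 h with rfl | h'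
    · unfold pvReps
      split
      · rename_i hc; tauto
      · right; right; left; exact List.mem_cons_self
    · unfold pvReps
      rcases ih (seen := seen ++ [p]) h' with h1 | h1 | h1 | h1
      · rcases List.mem_append.1 h1 with h2 | h2
        · tauto
        · -- q = p
          simp at h2; subst h2
          split
          · rename_i hc; tauto
          · right; right; left; exact List.mem_cons_self
      · rcases List.mem_append.1 h1 with h2 | h2
        · tauto
        · simp at h2  -- pvSw q = p
          split
          · rename_i hc; rw [← h2] at hc
            rcases hc with hc | hc
            · right; left; exact hc
            · left; simpa [pvSw] using hc
          · right; right; right; rw [h2]; exact List.mem_cons_self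
      · split
        · tauto
        · right; right; left; exact List.mem_cons_of_mem _ h1
      · split
        · tauto
        · right; right; right; exact List.mem_cons_of_mem _ h1

theorem pvReps_nodup (seen l : List (String × String)) : (pvReps seen l).Nodup := by
  induction l generalizing seen with
  | nil => simp [pvReps]
  | cons p t ih =>
    unfold pvReps
    split
    · exact ih _
    · refine List.nodup_cons.2 ⟨?_, ih _⟩
      intro hmem
      have := (pvReps_subset hmem).2.1
      simp at this

theorem pvReps_ne_sw {seen l : List (String × String)} {a b : String × String}
    (ha : a ∈ pvReps seen l) (hb : b ∈ pvReps seen l) (hne : a ≠ b) : pvSw a ≠ b := by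
  induction l generalizing seen with
  | nil => simp [pvReps] at ha
  | cons p t ih =>
    unfold pvReps at ha hb
    by_cases hc : p ∈ seen ∨ pvSw p ∈ seen
    · rw [if_pos hc] at ha hb
      exact ih ha hb
    · rw [if_neg hc] at ha hb
      rcases List.mem_cons.1 ha with rfl | ha' <;> rcases List.mem_cons.1 hb with h | hb'
      · exact absurd h.symm hne
      · intro hab
        have := (pvReps_subset hb').2.2
        rw [← hab] at this
        simp [pvSw] at this
      · subst h
        have := (pvReps_subset ha').2.2
        intro hab; rw [hab] at this; simp at this
      · exact ih ha' hb'

theorem pvReps_snoc (seen l : List (String × String)) (p : String × String) :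
    pvReps seen (l ++ [p]) =
      pvReps seen l ++ (if p ∈ seen ++ l ∨ pvSw p ∈ seen ++ l then [] else [p]) := by
  induction l generalizing seen with
  | nil => simp [pvReps]
  | cons q t ih =>
    rw [List.cons_append]
    simp only [pvReps]
    rw [List.append_cons seen q t]
    split
    · exact ih (seen ++ [q])
    · rw [ih (seen ++ [q])]
      simp [List.cons_append]

theorem pvCount_snoc (l : List (String × String)) (p q i : String × String) :
    pvCount (l ++ [p]) q i = pvCount l q i + if p = q ∨ p = i then 1 else 0 := by
  rw [pvCount_eq_countP, pvCount_eq_countP, List.countP_append]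
  simp only [List.countP_cons, List.countP_nil]
  by_cases h : p = q ∨ p = i <;> simp [h]

theorem pvA_loop (l : List (String × String)) :
    (l.foldl pvStepA PySem.Dict.empty).items =
      (pvReps [] l).map (fun p => (p, pvCount l p (pvSw p))) := by
  induction l using List.reverseRecOn with
  | nil => simp [pvReps]; rfl
  | append_singleton l p ih =>
    rw [List.foldl_append, List.foldl_cons, List.foldl_nil]
    have hitems := ih
    set d := l.foldl pvStepA PySem.Dict.empty with hd
    have hkeys : d.keys = pvReps [] l := by
      simp only [PySem.Dict.keys, hitems, List.map_map]
      simp [Function.comp_def]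
    have hnd : d.keys.Nodup := by rw [hkeys]; exact pvReps_nodup _ _
    have hcont : ∀ x, d.contains x = decide (x ∈ pvReps [] l) := fun x => by
      rw [PySem.Dict.contains_eq_decide_mem_keys, hkeys]
    have hmemitems : ∀ q, q ∈ pvReps [] l → (q, pvCount l q (pvSw q)) ∈ d.items := by
      intro q hq; rw [hitems]; exact List.mem_map_of_mem hq
    by_cases hp : p ∈ pvReps [] l
    · -- first branch: p already a key
      have hc : d.contains p = true := by rw [hcont]; simp [hp]
      have hget : d.getD p 0 = pvCount l p (pvSw p) :=
        PySem.Dict.getD_of_mem_items d (hmemitems p hp) hnd 0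
      unfold pvStepA
      rw [if_pos hc, PySem.Dict.items_insert_of_contains d _ hc]
      rw [pvReps_snoc, if_pos (Or.inl (by simpa using (pvReps_subset hp).1)), List.append_nil]
      rw [hitems, List.map_map]
      apply List.map_congr_left
      intro q hq
      by_cases hqp : q = p
      · subst hqp
        simp [hget, pvCount_snoc]
      · have hsw : pvSw q ≠ p := pvReps_ne_sw hq hp hqp
        have : ¬ (p = q ∨ p = pvSw q) := by
          rintro (rfl | rfl)
          · exact hqp rfl
          · exact hsw rfl
        simp only [Function.comp_apply]
        rw [pvCount_snoc, if_neg this, add_zero]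
        simp [hqp]
    · by_cases hswp : pvSw p ∈ pvReps [] l
      · -- second branch: inverse is a key
        have hc1 : d.contains p = false := by rw [hcont]; simp [hp]
        have hc2 : d.contains (p.2, p.1) = true := by
          rw [hcont]; simpa [pvSw] using hswp
        have hget : d.getD (pvSw p) 0 = pvCount l (pvSw p) (pvSw (pvSw p)) :=
          PySem.Dict.getD_of_mem_items d (hmemitems _ hswp) hnd 0
        unfold pvStepA
        rw [if_neg (by simp [hc1]), if_pos hc2]
        rw [PySem.Dict.items_insert_of_contains d _ hc2]
        rw [pvReps_snoc, if_pos (Or.inr (by simpa using (pvReps_subset hswp).1)), List.append_nil]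
        rw [hitems, List.map_map]
        apply List.map_congr_left
        intro q hq
        by_cases hq' : q = pvSw p
        · subst hq'
          have hbeq : ((pvSw p : String × String) == (p.2, p.1)) = true := by simp [pvSw]
          simp only [Function.comp_apply, hbeq, if_pos]
          have : (p = pvSw p ∨ p = pvSw (pvSw p)) := Or.inr (by rw [pvSw_sw])
          simp [pvCount_snoc, pvSw]
          exact hget
        · have : ¬ (p = q ∨ p = pvSw q) := by
            rintro (rfl | h)
            · exact hp hq
            · exact hq' (by rw [h, pvSw_sw])
          simp only [Function.comp_apply, pvCount_snoc, if_neg this, add_zero]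
          have hbeq : (q == ((p.2, p.1) : String × String)) = false := by
            simpa [pvSw] using hq'
          simp [hbeq]
      · -- third branch: fresh class
        have hc1 : d.contains p = false := by rw [hcont]; simp [hp]
        have hc2 : d.contains (p.2, p.1) = false := by
          rw [hcont]; simpa [pvSw] using hswp
        have hpl : p ∉ l := by
          intro hmem
          rcases pvReps_cover (seen := []) hmem with h | h | h | h
          · simp at h
          · simp at h
          · exact hp h
          · exact hswp h
        have hswl : pvSw p ∉ l := by
          intro hmem
          rcases pvReps_cover (seen := []) hmem with h | h | h | h
          · simp at h
          · simp at h
          · exact hswp h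
          · rw [pvSw_sw] at h; exact hp h
        unfold pvStepA
        rw [if_neg (by simp [hc1]), if_neg (by simp [hc2])]
        rw [PySem.Dict.items_insert_of_not_contains d _ hc1]
        rw [pvReps_snoc, if_neg (by simp; exact ⟨hpl, hswl⟩), List.map_append]
        congr 1
        · rw [hitems]
          apply List.map_congr_left
          intro q hq
          have hql : q ∈ l := by simpa using (pvReps_subset hq).1
          have : ¬ (p = q ∨ p = pvSw q) := by
            rintro (rfl | h)
            · exact hpl hql
            · apply hswl; rw [h, pvSw_sw]; exact hql
          simp [pvCount_snoc, this]
        · have hzero : pvCount l p (pvSw p) = 0 := by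
            rw [pvCount_eq_countP]
            have h0 : l.countP (fun q => decide (q = p ∨ q = pvSw p)) = 0 :=
              List.countP_eq_zero.2 (by
                intro q hql
                simp only [decide_eq_true_eq, not_or]
                constructor
                · rintro rfl; exact hpl hql
                · rintro rfl; exact hswl hql)
            rw [h0]
            rfl
          simp [pvCount_snoc, hzero]

theorem pvItems_erase (d : PySem.Dict (String × String) Int) (k : String × String) :
    (d.erase k).items = d.items.filter (fun p => !(p.1 == k)) := rfl

theorem pvErase_fold (es : List ((String × String) × Int)) (d : PySem.Dict (String × String) Int) :
    (es.foldl (fun (d : PySem.Dict (String × String) Int) kv =>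
        if kv.2 < 5 then d.erase kv.1 else d) d).items =
      d.items.filter (fun kv => es.all (fun e => !(decide (e.2 < 5) && (kv.1 == e.1)))) := by
  induction es generalizing d with
  | nil => simp
  | cons e t ih =>
    rw [List.foldl_cons]
    by_cases h : e.2 < 5
    · rw [if_pos h, ih, pvItems_erase, List.filter_filter]
      apply List.filter_congr
      intro kv _
      simp [h, Bool.and_comm]
    · rw [if_neg h, ih]
      apply List.filter_congr
      intro kv _
      simp [h]

theorem pvB_loop (pairs : List (String × String)) :
    ∀ (l seen : List (String × String)) (r : PySem.Dict (String × String) Int),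
      (∀ k ∈ r.keys, k ∈ seen) →
      (l.foldl (pvStepB pairs) (r, seen)).1.items =
        r.items ++ ((pvReps seen l).map (fun p => (p, pvCount pairs p (pvSw p)))).filter
          (fun kv => decide (5 ≤ kv.2)) := by
  intro l
  induction l with
  | nil => intro seen r _; simp [pvReps]
  | cons p t ih =>
    intro seen r hkeys
    by_cases hc : p ∉ seen ∧ ((p.2, p.1) : String × String) ∉ seen
    · have hfresh : r.contains p = false := by
        rw [PySem.Dict.contains_eq_decide_mem_keys]
        simp only [decide_eq_false_iff_not]
        intro hmem
        exact hc.1 (hkeys p hmem)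
      have hreps : pvReps seen (p :: t) = p :: pvReps (seen ++ [p]) t := by
        unfold pvReps
        rw [if_neg (by simpa [pvSw] using hc)]
        cases t <;> simp [pvReps]
      by_cases h5 : pvCount pairs p (p.2, p.1) ≥ 5
      · have hstep : pvStepB pairs (r, seen) p
            = (r.insert p (pvCount pairs p (p.2, p.1)), seen ++ [p]) := by
          simp [pvStepB, hc, h5]
        rw [List.foldl_cons, hstep, ih (seen ++ [p]) _ ?_]
        · rw [PySem.Dict.items_insert_of_not_contains r _ hfresh]
          rw [hreps]
          simp only [List.map_cons, List.filter_cons]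
          rw [if_pos (by simpa [pvSw] using h5)]
          simp [pvSw]
        · intro k hk
          rcases (PySem.Dict.mem_keys_insert _ _ _ _).1 hk with rfl | hk'
          · simp
          · exact List.mem_append_left _ (hkeys k hk')
      · have hstep : pvStepB pairs (r, seen) p = (r, seen ++ [p]) := by
          simp [pvStepB, hc, h5]
        rw [List.foldl_cons, hstep,
          ih (seen ++ [p]) r (fun k hk => List.mem_append_left _ (hkeys k hk)), hreps]
        simp only [List.map_cons, List.filter_cons]
        rw [if_neg (by simpa [pvSw] using h5)]
    · have hstep : pvStepB pairs (r, seen) p = (r, seen ++ [p]) := by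
        simp only [pvStepB, if_neg hc]
      have hreps : pvReps seen (p :: t) = pvReps (seen ++ [p]) t := by
        unfold pvReps
        rw [if_pos (by
          rcases not_and_or.1 hc with h | h
          · exact Or.inl (not_not.1 h)
          · exact Or.inr (by simpa [pvSw] using not_not.1 h))]
        cases t <;> simp [pvReps]
      rw [List.foldl_cons, hstep,
        ih (seen ++ [p]) r (fun k hk => List.mem_append_left _ (hkeys k hk)), hreps]

-- ===== VERDICT (by name: the statement is the Claim_ definition above) =====
theorem groupAndRemove_spec : Claim_equal_groupAndRemove := by
  intro pairs _
  unfold Spec_groupAndRemove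
  unfold groupAndRemove groupAndRemove_alt
  simp only
  congr 1
  rw [pvErase_fold, pvB_loop pairs pairs [] PySem.Dict.empty (by simp [PySem.Dict.keys, PySem.Dict.empty])]
  have hemp : (PySem.Dict.empty : PySem.Dict (String × String) Int).items = [] := rfl
  rw [hemp, List.nil_append, pvA_loop]
  apply List.filter_congr
  intro kv hkv
  obtain ⟨q, hq, rfl⟩ := List.mem_map.1 hkv
  by_cases h5 : pvCount pairs q (pvSw q) < 5
  · have hd : decide (5 ≤ ((q, pvCount pairs q (pvSw q)) : (String × String) × Int).2) = false := by
      simp; omega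
    rw [hd, List.all_eq_false]
    exact ⟨(q, pvCount pairs q (pvSw q)), List.mem_map_of_mem hq, by simp [h5]⟩
  · have hd : decide (5 ≤ ((q, pvCount pairs q (pvSw q)) : (String × String) × Int).2) = true := by
      simp; omega
    rw [hd, List.all_eq_true]
    intro e he
    obtain ⟨q', hq', rfl⟩ := List.mem_map.1 he
    by_cases hqq : q = q'
    · subst hqq; simp [h5]
    · simp [hqq]
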